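-- pv_equiv track=rewrite | github.com/K0max/CryptoIntroductionHW | CryptoPractice2/HW2_main.py | getEquivalentNum
-- ===== SOURCE A (Python) =====
-- import math
--
-- def getEquivalentNum(N_cycle_list, N, total_permutation_num):
--     # 编写一个字典，key为N_cycle_list里面出现的非零元素，value为该元素出现的次数
--     # 例如N_cycle_list = [1, 1, 2, 2, 2, 0, 0, 0]，那么这个字典为{1: 2, 2: 3}
--     n = N
--     N_cycle_dict = {}
--     for i in N_cycle_list:
--         if i != 0:
--             if i not in N_cycle_dict.keys():
--                 N_cycle_dict[i] = 1
--             else: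
--                 N_cycle_dict[i] += 1
--     # 计算其排列组合的个数
--     # 例如N_cycle_dict = {1: 2, 2: 3}，那么N=1*2+2*3=8,其排列组合的个数为comb(8,1)*comb(7,1)*comb(6,2)*comb(4,2)*comb(2,2)/(perm(2,2)*perm(3,3))=420
--     portion_inverse = 1
--     for key, value in N_cycle_dict.items():
--         portion_inverse *= key**value * math.factorial(value)
--     result = total_permutation_num // portion_inverse
--     return result
-- ===== SOURCE B (Python) =====
-- def getEquivalentNum(N_cycle_list, N, total_permutation_num):
--     # Sort the nonzero cycle lengths; equal lengths become one contiguous run.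
--     # One scan with a run counter: the j-th element of a run of value k
--     # contributes a factor k*j, so a run of length c contributes k**c * c!.
--     vals = sorted(x for x in N_cycle_list if x != 0)
--     portion = 1
--     prev = None
--     run = 0
--     for x in vals:
--         run = run + 1 if x == prev else 1
--         prev = x
--         portion *= x * run
--     return total_permutation_num // portion
-- ===== Notes on version B (the rewrite author's own statement) =====
-- stated objective: alternative
-- what changed: B replaces A's insertion-ordered frequency dict and per-key power/factorial products by sorting the nonzero cycle lengths and doing a single run-length scan, multiplying x*run for each element so a run of length c contributes k^c * c! without ever building a dict.
import Mathlib
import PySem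

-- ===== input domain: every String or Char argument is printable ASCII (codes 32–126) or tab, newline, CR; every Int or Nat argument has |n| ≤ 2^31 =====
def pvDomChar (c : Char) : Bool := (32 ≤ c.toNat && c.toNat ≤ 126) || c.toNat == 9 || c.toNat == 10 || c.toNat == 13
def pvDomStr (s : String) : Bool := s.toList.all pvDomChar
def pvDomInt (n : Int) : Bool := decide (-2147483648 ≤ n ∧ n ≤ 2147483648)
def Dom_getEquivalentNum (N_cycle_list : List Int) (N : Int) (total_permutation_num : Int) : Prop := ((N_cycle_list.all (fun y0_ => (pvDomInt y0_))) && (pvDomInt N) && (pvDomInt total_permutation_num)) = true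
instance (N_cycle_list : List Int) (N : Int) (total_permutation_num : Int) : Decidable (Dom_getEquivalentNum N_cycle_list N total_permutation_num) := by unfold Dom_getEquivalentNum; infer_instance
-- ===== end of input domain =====

-- B replaces A's dict-of-counts by sort + one run-length scan (each run of value k of
-- length c contributes k^c * c! as the product of k*1, …, k*c); objective: alternative.

-- ===== PORT A =====
-- transliteration of A: build the frequency dict of the nonzero entries, then
-- multiply key**value * factorial(value) over its items; '**' and math.factorial are
-- exact here because every stored value is a positive count.
def getEquivalentNum (N_cycle_list : List Int) (N : Int) (total_permutation_num : Int) : Int :=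
  let _n := N
  let N_cycle_dict : PySem.Dict Int Int :=
    N_cycle_list.foldl (fun d i =>
      if i ≠ 0 then
        if d.contains i = false then d.insert i 1
        else d.insert i (d.getD i 0 + 1)  -- N_cycle_dict[i] += 1 (key present in this branch)
      else d) PySem.Dict.empty
  let portion_inverse : Int :=
    N_cycle_dict.items.foldl
      (fun acc kv => acc * (kv.1 ^ kv.2.toNat * (Nat.factorial kv.2.toNat : Int))) 1
  PySem.Int.floordiv total_permutation_num portion_inverse

-- ===== PORT B =====
-- the scan loop of Source B: run = run+1 if x == prev else 1; portion *= x * run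
def pvAltLoop : List Int → Option Int → Int → Int → Int
  | [], _, _, portion => portion
  | x :: xs, prev, run, portion =>
    let run' := if some x = prev then run + 1 else 1
    pvAltLoop xs (some x) run' (portion * (x * run'))

def getEquivalentNum_alt (N_cycle_list : List Int) (N : Int) (total_permutation_num : Int) : Int :=
  let vals := PySem.List.sorted (N_cycle_list.filter (fun x => x ≠ 0)) (fun x => x)
  PySem.Int.floordiv total_permutation_num (pvAltLoop vals none 0 1)

-- ===== PRECONDITION & SPEC =====
def Spec_getEquivalentNum (N_cycle_list : List Int) (N : Int) (total_permutation_num : Int) (out : Int) : Prop := out = getEquivalentNum_alt N_cycle_list N total_permutation_num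
instance (N_cycle_list : List Int) (N : Int) (total_permutation_num : Int) (out : Int) : Decidable (Spec_getEquivalentNum N_cycle_list N total_permutation_num out) := by unfold Spec_getEquivalentNum; infer_instance

-- ===== CLAIM (what is proved, stated in full; the proofs are below) =====
def Claim_equal_getEquivalentNum : Prop := ∀ (N_cycle_list : List Int) (N : Int) (total_permutation_num : Int), Dom_getEquivalentNum N_cycle_list N total_permutation_num → Spec_getEquivalentNum N_cycle_list N total_permutation_num (getEquivalentNum N_cycle_list N total_permutation_num)

-- ===== LEMMAS AND PROOFS =====

-- reference loop: consume xs left to right, multiplying in x * (1 + #occurrences of x seen so far)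
def pvCgo : List Int → List Int → Int → Int
  | [], _, acc => acc
  | x :: xs, seen, acc => pvCgo xs (seen ++ [x]) (acc * (x * ((seen.count x : Int) + 1)))

-- the common closed form: product over the distinct nonzero values of k^count * count!
def pvProd (M : List Int) : Int :=
  ((PySem.Set.ofList M).map (fun k => k ^ (M.count k) * (Nat.factorial (M.count k) : Int))).prod

lemma pvCgo_seen_congr : ∀ (xs s1 s2 : List Int) (acc : Int),
    (∀ k, s1.count k = s2.count k) → pvCgo xs s1 acc = pvCgo xs s2 acc := by
  intro xs
  induction xs with
  | nil => intro _ _ _ _; rfl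
  | cons x t ih =>
    intro s1 s2 acc h
    simp only [pvCgo, h x]
    exact ih _ _ _ (fun k => by simp [List.count_append, h k])

lemma pvCgo_perm : ∀ {l l' : List Int}, l.Perm l' → ∀ (seen : List Int) (acc : Int),
    pvCgo l seen acc = pvCgo l' seen acc := by
  intro l l' h
  induction h with
  | nil => intro _ _; rfl
  | cons x _ ih => intro seen acc; simp only [pvCgo]; exact ih _ _
  | swap x y l =>
    intro seen acc
    simp only [pvCgo]
    by_cases hxy : x = y
    · subst hxy; rfl
    · have h1 : (seen ++ [y]).count x = seen.count x := by
        have h0 : List.count x [y] = 0 := List.count_eq_zero.mpr (by simp [hxy])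
        simp [List.count_append, h0]
      have h2 : (seen ++ [x]).count y = seen.count y := by
        have h0 : List.count y [x] = 0 :=
          List.count_eq_zero.mpr (by simp; exact fun h => hxy h.symm)
        simp [List.count_append, h0]
      have hperm : (seen ++ [y] ++ [x]).Perm (seen ++ [x] ++ [y]) := by
        simp only [List.append_assoc]
        exact List.Perm.append_left seen (List.Perm.swap x y [])
      rw [h1, h2, pvCgo_seen_congr _ (seen ++ [y] ++ [x]) (seen ++ [x] ++ [y]) _
          (fun k => hperm.count_eq k)]
      ring_nf
  | trans _ _ ih1 ih2 => intro seen acc; rw [ih1, ih2]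

lemma pvCgo_append : ∀ (l : List Int) (k : Int) (seen : List Int) (acc : Int),
    pvCgo (l ++ [k]) seen acc = pvCgo l seen acc * (k * (((seen ++ l).count k : Int) + 1)) := by
  intro l
  induction l with
  | nil => intro k seen acc; simp [pvCgo]
  | cons x t ih =>
    intro k seen acc
    simp only [List.cons_append, pvCgo]
    rw [ih]
    have : seen ++ [x] ++ t = seen ++ x :: t := by simp
    rw [this]

lemma pvProd_map_update {s : List Int} {k : Int} (hk : k ∈ s) (hs : s.Nodup)
    (f f' : Int → Int) (hagree : ∀ x ∈ s, x ≠ k → f x = f' x) :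
    (s.map f).prod * f' k = (s.map f').prod * f k := by
  induction s with
  | nil => cases hk
  | cons a t ih =>
    rcases List.mem_cons.mp hk with hka | hkt
    · have hnt : k ∉ t := by rw [hka]; exact (List.nodup_cons.mp hs).1
      have hmap : t.map f = t.map f' := List.map_congr_left (fun x hx =>
        hagree x (List.mem_cons_of_mem _ hx) (fun h => hnt (h ▸ hx)))
      simp only [List.map_cons, List.prod_cons, hmap, ← hka]; ring
    · have hak : a ≠ k := fun h => (List.nodup_cons.mp hs).1 (h ▸ hkt)
      have hfa : f a = f' a := hagree a List.mem_cons_self hak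
      have := ih hkt (List.nodup_cons.mp hs).2
        (fun x hx hxk => hagree x (List.mem_cons_of_mem _ hx) hxk)
      simp only [List.map_cons, List.prod_cons, hfa, mul_assoc, this]

lemma pvAltLoop_eq_cgo : ∀ (xs seen : List Int) (prev : Option Int) (run acc : Int),
    List.Pairwise (· ≤ ·) xs →
    (∀ y ∈ seen, ∀ x ∈ xs, y ≤ x) →
    (match prev with
     | none => seen = []
     | some p => run = (seen.count p : Int) ∧ (∀ y ∈ seen, y ≤ p) ∧ p ∈ seen) →
    pvAltLoop xs prev run acc = pvCgo xs seen acc := by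
  intro xs
  induction xs with
  | nil => intro _ _ _ _ _ _ _; rfl
  | cons x t ih =>
    intro seen prev run acc hsort hle hinv
    have hsort' := (List.pairwise_cons.mp hsort).2
    have hxle := (List.pairwise_cons.mp hsort).1
    cases prev with
    | none =>
      subst hinv
      simp only [pvAltLoop, pvCgo, reduceCtorEq, if_false]
      rw [show ((([] : List Int).count x : Int) + 1) = 1 by simp]
      exact ih [x] (some x) 1 _ hsort'
        (by intro y hy z hz; simp at hy; subst hy; exact hxle z hz)
        (by refine ⟨by simp, fun y hy => ?_, by simp⟩; simp at hy; subst hy; rfl)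
    | some p =>
      obtain ⟨hrun, hsp, hps⟩ := hinv
      by_cases hxp : x = p
      · subst hxp
        simp only [pvAltLoop, pvCgo]
        rw [hrun]
        exact ih (seen ++ [x]) (some x) _ _ hsort'
          (by intro y hy z hz
              rcases List.mem_append.mp hy with h | h
              · exact hle y h z (List.mem_cons_of_mem _ hz)
              · simp at h; subst h; exact hxle z hz)
          (by refine ⟨by simp [List.count_append], fun y hy => ?_, by simp⟩
              rcases List.mem_append.mp hy with h | h
              · exact hsp y h
              · simp at h; subst h; rfl)
      · have hxnotseen : x ∉ seen := by
          intro hxs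
          have h1 : x ≤ p := hsp x hxs
          have h2 : p ≤ x := hle p hps x List.mem_cons_self
          exact hxp (le_antisymm h1 h2)
        have hcnt : seen.count x = 0 := List.count_eq_zero.mpr hxnotseen
        simp only [pvAltLoop, pvCgo, Option.some.injEq, if_neg hxp, hcnt]
        rw [show ((0 : Nat) : Int) + 1 = 1 by simp]
        exact ih (seen ++ [x]) (some x) _ _ hsort'
          (by intro y hy z hz
              rcases List.mem_append.mp hy with h | h
              · exact hle y h z (List.mem_cons_of_mem _ hz)
              · simp at h; subst h; exact hxle z hz)
          (by refine ⟨by simp [List.count_append, hcnt], fun y hy => ?_, by simp⟩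
              rcases List.mem_append.mp hy with h | h
              · exact le_trans (hsp y h) (hle p hps x List.mem_cons_self)
              · simp at h; subst h; rfl)

lemma pvCgo_eq_pvProd : ∀ (M : List Int), (∀ x ∈ M, x ≠ 0) → pvCgo M [] 1 = pvProd M := by
  intro M
  induction M using List.reverseRecOn with
  | nil => intro _; rfl
  | append_singleton M k ih =>
    intro hnz
    have hnzM : ∀ x ∈ M, x ≠ 0 := fun x hx => hnz x (List.mem_append_left _ hx)
    have hk0 : k ≠ 0 := hnz k (by simp)
    rw [pvCgo_append, List.nil_append, ih hnzM]
    have hset : PySem.Set.ofList (M ++ [k]) = PySem.Set.add (PySem.Set.ofList M) k := by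
      simp [PySem.Set.ofList_eq_foldl, List.foldl_append]
    by_cases hkM : k ∈ M
    · -- same key set, only the k-factor changes
      have hsetM : PySem.Set.ofList (M ++ [k]) = PySem.Set.ofList M := by
        rw [hset, PySem.Set.add_of_mem ((PySem.Set.mem_ofList M k).mpr hkM)]
      have hcount : (M ++ [k]).count k = M.count k + 1 := by simp [List.count_append]
      have hcne : ∀ x, x ≠ k → (M ++ [k]).count x = M.count x := by
        intro x hx
        have h0 : List.count x [k] = 0 := List.count_eq_zero.mpr (by simp [hx])
        simp [List.count_append, h0]
      have hupd := pvProd_map_update ((PySem.Set.mem_ofList M k).mpr hkM)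
        (PySem.Set.nodup_ofList M)
        (fun x => x ^ (M.count x) * (Nat.factorial (M.count x) : Int))
        (fun x => x ^ ((M ++ [k]).count x) * (Nat.factorial ((M ++ [k]).count x) : Int))
        (fun x _ hx => by beta_reduce; rw [hcne x hx])
      beta_reduce at hupd
      have hfac : (k : Int) ^ ((M ++ [k]).count k) * (Nat.factorial ((M ++ [k]).count k) : Int)
          = (k ^ (M.count k) * (Nat.factorial (M.count k) : Int))
              * (k * ((M.count k : Int) + 1)) := by
        rw [hcount, pow_succ, Nat.factorial_succ]; push_cast; ring
      rw [hfac] at hupd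
      have hne : (k : Int) ^ (M.count k) * (Nat.factorial (M.count k) : Int) ≠ 0 :=
        mul_ne_zero (pow_ne_zero _ hk0) (by exact_mod_cast Nat.factorial_ne_zero (M.count k))
      apply mul_right_cancel₀ hne
      unfold pvProd
      rw [hsetM]
      linear_combination hupd
    · -- fresh key: the set gains k at the end, other counts unchanged
      have hsetM : PySem.Set.ofList (M ++ [k]) = PySem.Set.ofList M ++ [k] := by
        rw [hset, PySem.Set.add_of_not_mem (fun h => hkM ((PySem.Set.mem_ofList M k).mp h))]
      have hcM : M.count k = 0 := List.count_eq_zero.mpr hkM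
      have hcnew : (M ++ [k]).count k = 1 := by simp [List.count_append, hcM]
      unfold pvProd
      rw [hsetM, List.map_append, List.prod_append]
      have hmaps : (PySem.Set.ofList M).map
            (fun x => x ^ ((M ++ [k]).count x) * (Nat.factorial ((M ++ [k]).count x) : Int))
          = (PySem.Set.ofList M).map
            (fun x => x ^ (M.count x) * (Nat.factorial (M.count x) : Int)) :=
        List.map_congr_left (fun x hx => by
          have hxk : x ≠ k := fun h => hkM (h ▸ (PySem.Set.mem_ofList M x).mp hx)
          have h0 : List.count x [k] = 0 := List.count_eq_zero.mpr (by simp [hxk])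
          simp [List.count_append, h0])
      rw [hmaps, List.map_singleton, List.prod_singleton, hcnew, hcM]
      simp [Nat.factorial]

-- A's dict pipeline computes pvProd of the nonzero entries
lemma pvFoldlMul (f : Int → Int) : ∀ (l : List Int) (a : Int),
    List.foldl (fun acc x => acc * f x) a l = a * (l.map f).prod := by
  intro l
  induction l with
  | nil => intro a; simp
  | cons x t ih => intro a; simp only [List.foldl_cons, List.map_cons, List.prod_cons, ih, mul_assoc]

-- A's dict pipeline computes pvProd of the nonzero entries
lemma getEquivalentNum_eq_prod (L : List Int) (N T : Int) :
    getEquivalentNum L N T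
      = PySem.Int.floordiv T (pvProd (L.filter (fun x => x ≠ 0))) := by
  show PySem.Int.floordiv T
      (((L.foldl (fun d i =>
          if i ≠ 0 then
            if d.contains i = false then d.insert i 1
            else d.insert i (d.getD i 0 + 1)
          else d) (PySem.Dict.empty : PySem.Dict Int Int)).items).foldl
        (fun acc kv => acc * (kv.1 ^ kv.2.toNat * (Nat.factorial kv.2.toNat : Int))) 1)
      = _
  have hstep : (fun (d : PySem.Dict Int Int) i =>
      if i ≠ 0 then
        if d.contains i = false then d.insert i 1
        else d.insert i (d.getD i 0 + 1)
      else d)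
      = (fun (d : PySem.Dict Int Int) i =>
          if (fun x => decide (x ≠ 0)) i = true then d.insert i (d.getD i 0 + 1) else d) := by
    funext d i
    by_cases hi : i = 0
    · simp [hi]
    · simp only [hi, ne_eq, not_false_eq_true, if_true, decide_true]
      by_cases hc : d.contains i = false
      · rw [if_pos hc, PySem.Dict.getD_of_not_contains d 0 hc]
        norm_num
      · rw [if_neg hc]
  rw [hstep, ← List.foldl_filter, PySem.Dict.foldl_insert_getD_add_one_eq_counter,
      PySem.Dict.items_counter]
  congr 1
  rw [List.foldl_map]
  rw [pvFoldlMul (fun k => k ^ ((k, ((L.filter (fun x => x ≠ 0)).count k : Int)).2.toNat)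
        * (Nat.factorial ((k, ((L.filter (fun x => x ≠ 0)).count k : Int)).2.toNat) : Int))]
  unfold pvProd
  simp

-- B's sorted scan computes the same product
lemma getEquivalentNum_alt_eq_prod (L : List Int) (N T : Int) :
    getEquivalentNum_alt L N T
      = PySem.Int.floordiv T (pvProd (L.filter (fun x => x ≠ 0))) := by
  show PySem.Int.floordiv T
      (pvAltLoop (PySem.List.sorted (L.filter (fun x => x ≠ 0)) (fun x => x)) none 0 1) = _
  congr 1
  rw [pvAltLoop_eq_cgo _ [] none 0 1
        (PySem.List.sorted_pairwise (L.filter (fun x => x ≠ 0)) (fun x => x))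
        (by simp) rfl,
      pvCgo_perm (PySem.List.sorted_perm (L.filter (fun x => x ≠ 0)) (fun x => x) false)]
  exact pvCgo_eq_pvProd _ (fun x hx => by simpa using (List.mem_filter.mp hx).2)

-- ===== VERDICT (by name: the statement is the Claim_ definition above) =====
theorem getEquivalentNum_spec : Claim_equal_getEquivalentNum := by
  intro L N T _
  unfold Spec_getEquivalentNum
  rw [getEquivalentNum_eq_prod, getEquivalentNum_alt_eq_prod]
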